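-- pv_equiv track=rewrite | github.com/iamrajank/GeeksforGeeks-Coding-Solution | Difficulty: Medium/Unique Number III/unique-number-iii.py | getSingle
-- ===== SOURCE A (Python) =====
-- def getSingle(arr):
--     # code here
--     temp = {}
--     for i in arr:
--         if i not in temp:
--             temp[i] = 1
--         else:
--             temp[i] +=1
--     for i,j in temp.items():
--         if j == 1:
--             return i
-- ===== SOURCE B (Python) =====
-- def getSingle(arr):
--     # Simpler: scan arr in order and return the first element occurring exactly once.
--     for i in arr:
--         if arr.count(i) == 1:
--             return i
-- ===== Notes on version B (the rewrite author's own statement) =====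
-- stated objective: simpler
-- what changed: B drops A's frequency-dict construction and items scan, instead scanning arr directly and returning the first element whose count in arr is 1.
-- outside the precondition, e.g. on getSingle([2, 2]): A returns None, B returns None
import Mathlib
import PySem

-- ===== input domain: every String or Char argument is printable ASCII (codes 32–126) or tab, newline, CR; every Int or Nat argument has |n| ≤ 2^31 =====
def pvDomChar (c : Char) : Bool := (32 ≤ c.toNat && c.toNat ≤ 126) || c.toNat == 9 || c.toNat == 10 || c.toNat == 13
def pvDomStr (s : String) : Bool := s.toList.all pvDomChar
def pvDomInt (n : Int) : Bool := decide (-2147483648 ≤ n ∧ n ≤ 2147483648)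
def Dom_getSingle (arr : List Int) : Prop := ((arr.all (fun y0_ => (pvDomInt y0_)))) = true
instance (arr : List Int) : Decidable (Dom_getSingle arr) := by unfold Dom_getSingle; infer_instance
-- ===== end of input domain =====

-- B replaces A's frequency-dict build + items scan by a direct scan of arr returning the
-- first element with count 1 (simpler; same return value wherever A returns an int).

-- ===== PORT A =====
-- A builds temp = {} counting occurrences, then returns the first key with value 1;
-- the fall-through 'return None' is excluded by Pre_, the port returns 0 there.
def getSingle (arr : List Int) : Int :=
  let temp := arr.foldl
    (fun d i => if d.contains i then d.modify i 0 (· + 1) else d.insert i 1)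
    (PySem.Dict.empty : PySem.Dict Int Int)
  match temp.items.find? (fun p => p.2 == 1) with
  | some (i, _) => i
  | none => 0

-- ===== PORT B =====
-- B: 'for i in arr: if arr.count(i) == 1: return i' — find? is that loop with early return.
def getSingle_alt (arr : List Int) : Int :=
  match arr.find? (fun i => PySem.List.count arr i == 1) with
  | some i => i
  | none => 0

-- ===== PRECONDITION & SPEC =====
-- Pre_ excludes inputs with no element of count 1, on which Python A falls through and
-- returns None, which is not an int.
def Pre_getSingle (arr : List Int) : Prop := ∃ x ∈ arr, arr.count x = 1
instance (arr : List Int) : Decidable (Pre_getSingle arr) := by unfold Pre_getSingle; infer_instance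
def pvWitness_getSingle : List Int := [1, 1, 1, 2]
def Spec_getSingle (arr : List Int) (out : Int) : Prop := out = getSingle_alt arr
instance (arr : List Int) (out : Int) : Decidable (Spec_getSingle arr out) := by unfold Spec_getSingle; infer_instance

-- ===== CLAIM (what is proved, stated in full; the proofs are below) =====
def Claim_equal_getSingle : Prop := ∀ (arr : List Int), Dom_getSingle arr → Pre_getSingle arr → Spec_getSingle arr (getSingle arr)

-- ===== LEMMAS AND PROOFS =====

-- A's loop body is exactly the Counter step.
theorem pv_step_eq (d : PySem.Dict Int Int) (x : Int) :
    (if d.contains x then d.modify x 0 (· + 1) else d.insert x 1) = d.modify x 0 (· + 1) := by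
  by_cases h : d.contains x = true
  · simp [h]
  · have hc : d.contains x = false := by simpa using h
    rw [if_neg (by simp [hc])]
    apply PySem.Dict.ext
    have h0 : d.getD x 0 = 0 := PySem.Dict.getD_of_not_contains d 0 hc
    simp only [PySem.Dict.insert, PySem.Dict.modify, hc, Bool.false_eq_true, if_false, h0]
    norm_num

-- find? over a discard, for a predicate false at the discarded element.
theorem pv_find?_discard (s : List Int) (x : Int) (p : Int → Bool) (hx : p x = false) :
    (PySem.Set.discard s x).find? p = s.find? p := by
  induction s with
  | nil => rfl
  | cons a t ih =>
    by_cases hax : a = x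
    · subst hax
      simp [PySem.Set.discard, hx] at *
      exact ih
    · simp [PySem.Set.discard, List.find?_cons, hax] at *
      by_cases hpa : p a = true
      · simp [hpa]
      · simp [hpa] at *; simpa [PySem.Set.discard] using ih

-- the first match in set(xs) (first-occurrence order) is the first match in xs.
theorem pv_find?_ofList (xs : List Int) (p : Int → Bool) :
    (PySem.Set.ofList xs).find? p = xs.find? p := by
  induction xs with
  | nil => rfl
  | cons a t ih =>
    rw [PySem.Set.ofList_cons]
    by_cases hpa : p a = true
    · simp [hpa]
    · have hpa' : p a = false := by simpa using hpa
      simp only [List.find?_cons, hpa', pv_find?_discard _ _ _ hpa', ih]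

theorem getSingle_eq_alt (arr : List Int) : getSingle arr = getSingle_alt arr := by
  unfold getSingle getSingle_alt
  have hfold : arr.foldl
      (fun d i => if d.contains i then d.modify i 0 (· + 1) else d.insert i 1)
      (PySem.Dict.empty : PySem.Dict Int Int) = PySem.Dict.counter arr := by
    rw [PySem.Dict.counter_eq_foldl]
    congr 1
    funext d i
    exact pv_step_eq d i
  simp only []
  conv_lhs => rw [hfold]
  rw [PySem.Dict.items_counter, List.find?_map]
  have hpred : ((fun p => p.2 == 1) ∘ fun k => (k, (arr.count k : Int)))
      = fun i => PySem.List.count arr i == 1 := by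
    funext i
    simp [PySem.List.count]
  rw [hpred, pv_find?_ofList]
  cases arr.find? (fun i => PySem.List.count arr i == 1) <;> rfl

-- ===== VERDICT (by name: the statement is the Claim_ definition above) =====
theorem getSingle_spec : Claim_equal_getSingle := by
  intro arr _ _
  unfold Spec_getSingle
  exact getSingle_eq_alt arr
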